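-- pv_equiv track=rewrite | github.com/somm12/codingTest | 16주차_프로그래머스_lv1,2/72410.py | solution
-- ===== SOURCE A (Python) =====
-- def removeDuplicates(s):
--     chars = []
--     prev = None
--     for c in s:
--         if (prev != c and prev == '.') or prev != '.':
--             chars.append(c)
--             prev = c
--
--     return ''.join(chars)
--
-- def solution(new_id):
--     answer = ''
--     new_id = new_id.lower()
--     for i in new_id:
--         if i.isalpha() or i.isdigit():
--             answer += i
--         elif i in ('-','_','.'):
--             answer += i
--     answer = removeDuplicates(answer)
--
--     if answer != '':
--         if answer[0] == '.':
--             answer = answer[1:]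
--     if answer != '':
--         if answer[-1] == '.':
--             answer = answer[:-1]
--     if len(answer) == 0:
--         answer += 'a'
--
--     if len(answer) >= 16:
--         answer = answer[:15]
--         if answer[-1] == '.':
--             answer = answer[:-1]
--     if len(answer) <= 2:
--         t = answer[-1]
--         while len(answer) < 3:
--             answer += t
--     return answer
-- ===== SOURCE B (Python) =====
-- def solution(new_id):
--     # single fused pass: lowercase-filter, dot-run collapse and leading-dot skip
--     # are all decided by looking at the output built so far
--     out = []
--     for c in new_id.lower():
--         if c == '.':
--             if out and out[-1] != '.':
--                 out.append('.')
--         elif c.isalpha() or c.isdigit() or c in '-_':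
--             out.append(c)
--     if out and out[-1] == '.':
--         out.pop()
--     if not out:
--         out = ['a']
--     if len(out) >= 16:
--         del out[15:]
--         if out[-1] == '.':
--             out.pop()
--     out += out[-1:] * (3 - len(out))
--     return ''.join(out)
-- ===== Notes on version B (the rewrite author's own statement) =====
-- stated objective: faster
-- what changed: Replaces A's staged pipeline (filter pass building a string with +=, a separate prev-variable duplicate-dot scan, two guarded end-strips, a padding while-loop) with one fused list-building pass in which filtering, dot-run collapsing and leading-dot skipping are all decided from the last character of the output built so far, plus closed-form slice-replication padding.
import Mathlib
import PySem

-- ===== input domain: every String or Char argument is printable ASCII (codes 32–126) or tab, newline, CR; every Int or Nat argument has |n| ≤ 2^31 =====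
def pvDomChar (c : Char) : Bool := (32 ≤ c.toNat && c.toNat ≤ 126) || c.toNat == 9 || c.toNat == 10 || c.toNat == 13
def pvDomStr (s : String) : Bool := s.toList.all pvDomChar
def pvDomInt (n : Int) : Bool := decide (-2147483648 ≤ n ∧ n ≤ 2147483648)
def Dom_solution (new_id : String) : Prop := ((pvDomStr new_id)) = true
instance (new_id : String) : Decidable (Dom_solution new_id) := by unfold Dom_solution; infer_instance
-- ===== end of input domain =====

-- B fuses A's filter pass, prev-variable duplicate-dot scan and leading-dot strip into one
-- output-directed pass (decisions read the last char of the output built so far) and pads by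
-- closed-form slice replication (objective: faster by a constant factor — one pass over the characters instead of several).


-- ===== PORT A =====
-- removeDuplicates: prev-tracking scan, appends c unless prev == '.' and c == '.'
def removeDuplicates (s : List Char) : List Char :=
  (s.foldl (fun (st : List Char × Option Char) c =>
      if (st.2 ≠ some c ∧ st.2 = some '.') ∨ st.2 ≠ some '.' then (st.1 ++ [c], some c) else st)
    ([], none)).1

-- while len(answer) < 3: answer += t
def padWhile (answer : List Char) (t : Char) : List Char :=
  if answer.length < 3 then padWhile (answer ++ [t]) t else answer
termination_by 3 - answer.length

def solution (new_id : String) : String :=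
  -- filter loop over new_id.lower() (answer += i ported as acc ++ [i])
  let lowered := PySem.Chars.lower new_id.toList
  let answer := lowered.foldl (fun acc i =>
    if PySem.Chars.isalpha i || PySem.Chars.isdigit i then acc ++ [i]
    else if i = '-' ∨ i = '_' ∨ i = '.' then acc ++ [i]
    else acc) []
  let answer := removeDuplicates answer
  -- answer[0] == '.' on a nonempty list is head? = some '.'; answer[1:] is drop 1
  let answer := if answer ≠ [] then (if answer.head? = some '.' then answer.drop 1 else answer) else answer
  -- answer[-1] == '.' on a nonempty list is getLast? = some '.'; answer[:-1] is dropLast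
  let answer := if answer ≠ [] then (if answer.getLast? = some '.' then answer.dropLast else answer) else answer
  let answer := if answer.length = 0 then answer ++ ['a'] else answer
  let answer := if answer.length ≥ 16 then
      (let a := answer.take 15
       if a.getLast? = some '.' then a.dropLast else a)
    else answer
  let answer := if answer.length ≤ 2 then
      -- t = answer[-1]; the none branch is unreachable (answer is nonempty here)
      (match PySem.List.pyGet? answer (-1) with
       | some t => padWhile answer t
       | none => answer)
    else answer
  String.ofList answer

-- ===== PORT B =====
def solution_alt (new_id : String) : String :=
  -- one fused pass: append '.' only when out is nonempty and does not already end in '.'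
  let out := (PySem.Chars.lower new_id.toList).foldl (fun out c =>
    if c = '.' then (if out ≠ [] ∧ out.getLast? ≠ some '.' then out ++ ['.'] else out)
    else if PySem.Chars.isalpha c || PySem.Chars.isdigit c || c = '-' || c = '_' then out ++ [c]
    else out) []
  -- if out and out[-1] == '.': out.pop()
  let out := if out ≠ [] ∧ out.getLast? = some '.' then out.dropLast else out
  let out := if out = [] then ['a'] else out
  -- del out[15:] then conditional pop
  let out := if out.length ≥ 16 then
      (let a := out.take 15
       if a.getLast? = some '.' then a.dropLast else a)
    else out
  -- out += out[-1:] * (3 - len(out))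
  let out := out ++ (List.replicate (3 - out.length) (PySem.List.slice out (some (-1)) none)).flatten
  String.ofList out

-- ===== PRECONDITION & SPEC =====
def Spec_solution (new_id : String) (out : String) : Prop := out = solution_alt new_id
instance (new_id : String) (out : String) : Decidable (Spec_solution new_id out) := by unfold Spec_solution; infer_instance

-- ===== CLAIM =====
def Claim_equal_solution : Prop := ∀ (new_id : String), Dom_solution new_id → Spec_solution new_id (solution new_id)

-- ===== LEMMAS AND PROOFS =====

-- A's kept-character predicate
def keepP (c : Char) : Bool :=
  PySem.Chars.isalpha c || PySem.Chars.isdigit c || c = '-' || c = '_' || c = '.'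

-- A's prev-tracking scan as a structural recursion (prev only matters as "was '.'")
def remDupGo (prev : Option Char) : List Char → List Char
  | [] => []
  | c :: t =>
    if (prev ≠ some c ∧ prev = some '.') ∨ prev ≠ some '.' then c :: remDupGo (some c) t
    else remDupGo prev t

-- dot-run collapse with a "last output char was '.'" flag
def go (b : Bool) : List Char → List Char
  | [] => []
  | c :: t => if c = '.' then (if b then go b t else '.' :: go true t) else c :: go false t

-- drop one leading dot
def ldtail (l : List Char) : List Char := if l.head? = some '.' then l.tail else l

-- B's fused step
def bstep (out : List Char) (c : Char) : List Char :=
  if c = '.' then (if out ≠ [] ∧ out.getLast? ≠ some '.' then out ++ ['.'] else out)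
  else if PySem.Chars.isalpha c || PySem.Chars.isdigit c || c = '-' || c = '_' then out ++ [c]
  else out

theorem removeDuplicates_foldl_eq (l : List Char) :
    ∀ (acc : List Char) (prev : Option Char),
      (l.foldl (fun (st : List Char × Option Char) c =>
        if (st.2 ≠ some c ∧ st.2 = some '.') ∨ st.2 ≠ some '.' then (st.1 ++ [c], some c) else st)
        (acc, prev)).1 = acc ++ remDupGo prev l := by
  induction l with
  | nil => intro acc prev; simp [remDupGo]
  | cons c t ih =>
    intro acc prev
    simp only [List.foldl_cons, remDupGo]
    by_cases h : (prev ≠ some c ∧ prev = some '.') ∨ prev ≠ some '.'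
    · simp [h, ih]
    · simp [h]
      exact ih acc prev

theorem remDupGo_eq_go (l : List Char) :
    ∀ prev, remDupGo prev l = go (prev == some '.') l := by
  induction l with
  | nil => intro prev; simp [remDupGo, go]
  | cons c t ih =>
    intro prev
    by_cases hp : prev = some '.'
    · subst hp
      by_cases hc : c = '.'
      · subst hc
        have : ¬ ((some '.' ≠ some '.' ∧ (some '.' : Option Char) = some '.') ∨ (some '.' : Option Char) ≠ some '.') := by simp
        rw [remDupGo, if_neg this, go]
        simp [ih]
      · have hcond : (some '.' ≠ some c ∧ (some '.' : Option Char) = some '.') ∨ (some '.' : Option Char) ≠ some '.' :=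
          Or.inl ⟨by simpa using fun h => hc h.symm, rfl⟩
        rw [remDupGo, if_pos hcond, go, if_neg hc]
        have hb : (c == '.') = false := by simp [hc]
        simp [ih, hb]
    · have hcond : (prev ≠ some c ∧ prev = some '.') ∨ prev ≠ some '.' := Or.inr hp
      rw [remDupGo, if_pos hcond, go]
      by_cases hc : c = '.'
      · subst hc
        simp [hp, ih]
      · have hb : (c == '.') = false := by simp [hc]
        simp [hp, hb, hc, ih]

-- fused pass from a nonempty accumulator = accumulator ++ collapse of the filtered rest
theorem bstep_foldl_ne_nil (l : List Char) :
    ∀ (acc : List Char), acc ≠ [] →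
      l.foldl bstep acc = acc ++ go (acc.getLast? == some '.') (l.filter keepP) := by
  induction l with
  | nil => intro acc _; simp [go]
  | cons c t ih =>
    intro acc hacc
    by_cases hc : c = '.'
    · subst hc
      by_cases hl : acc.getLast? = some '.'
      · have : bstep acc '.' = acc := by simp [bstep, hl]
        rw [List.foldl_cons, this, ih acc hacc]
        simp [List.filter_cons, keepP, go, hl]
      · have : bstep acc '.' = acc ++ ['.'] := by simp [bstep, hacc, hl]
        rw [List.foldl_cons, this, ih (acc ++ ['.']) (by simp)]
        simp [List.filter_cons, keepP, go, hl]
    · by_cases hk : (PySem.Chars.isalpha c || PySem.Chars.isdigit c || c = '-' || c = '_') = true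
      · have : bstep acc c = acc ++ [c] := by simp [bstep, hc, hk]
        rw [List.foldl_cons, this, ih (acc ++ [c]) (by simp)]
        have hkeep : keepP c = true := by
          simp only [keepP] at *
          rcases Bool.or_eq_true _ _ |>.mp hk with h | h
          · rcases Bool.or_eq_true _ _ |>.mp h with h | h
            · rcases Bool.or_eq_true _ _ |>.mp h with h | h <;> simp [h]
            · simp [h]
          · simp [h]
        have hb : (c == '.') = false := by simp [hc]
        simp [List.filter_cons, hkeep, go, hb, hc]
      · have : bstep acc c = acc := by simp [bstep, hc, hk]
        have hkeep : keepP c = false := by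
          simp only [keepP]
          simp only [Bool.or_eq_true, not_or, Bool.not_eq_true] at hk ⊢
          simp [hk.1.1.1, hk.1.1.2, hk.1.2, hk.2, hc]
        rw [List.foldl_cons, this, ih acc hacc]
        simp [List.filter_cons, hkeep]

theorem go_true_eq_ldtail (m : List Char) : go true m = ldtail (go false m) := by
  cases m with
  | nil => simp [go, ldtail]
  | cons c t =>
    by_cases hc : c = '.'
    · subst hc; simp [go, ldtail]
    · simp [go, ldtail, hc]

-- fused pass from the empty accumulator = leading-dot strip of the collapsed filtered list
theorem bstep_foldl_nil (l : List Char) :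
    l.foldl bstep [] = ldtail (go false (l.filter keepP)) := by
  induction l with
  | nil => simp [go, ldtail]
  | cons c t ih =>
    by_cases hc : c = '.'
    · subst hc
      have : bstep [] '.' = [] := by simp [bstep]
      rw [List.foldl_cons, this, ih]
      have hkeep : keepP '.' = true := by simp [keepP]
      rw [List.filter_cons, if_pos hkeep]
      rw [show go false ('.' :: List.filter keepP t) = '.' :: go true (List.filter keepP t) by simp [go]]
      rw [go_true_eq_ldtail]
      simp [ldtail]
    · by_cases hk : (PySem.Chars.isalpha c || PySem.Chars.isdigit c || c = '-' || c = '_') = true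
      · have hb : bstep [] c = [c] := by simp [bstep, hc, hk]
        rw [List.foldl_cons, hb, bstep_foldl_ne_nil t [c] (by simp)]
        have hkeep : keepP c = true := by
          simp only [keepP]
          simp only [Bool.or_eq_true] at hk ⊢
          tauto
        have hb : (c == '.') = false := by simp [hc]
        simp [List.filter_cons, hkeep, go, hb, hc, ldtail]
      · have : bstep [] c = [] := by simp [bstep, hc, hk]
        have hkeep : keepP c = false := by
          simp only [keepP]
          simp only [Bool.or_eq_true, not_or, Bool.not_eq_true] at hk ⊢
          simp [hk.1.1.1, hk.1.1.2, hk.1.2, hk.2, hc]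
        rw [List.foldl_cons, this, ih]
        simp [List.filter_cons, hkeep]

theorem padWhile_eq (t : Char) : ∀ (a : List Char),
    padWhile a t = a ++ List.replicate (3 - a.length) t := by
  have key : ∀ (n : ℕ) (a : List Char), 3 - a.length ≤ n →
      padWhile a t = a ++ List.replicate (3 - a.length) t := by
    intro n
    induction n with
    | zero =>
      intro a ha
      have h3 : ¬ a.length < 3 := by omega
      rw [padWhile, if_neg h3]
      simp [Nat.sub_eq_zero_of_le (by omega : 3 ≤ a.length)]
    | succ n ih =>
      intro a ha
      by_cases h3 : a.length < 3
      · rw [padWhile, if_pos h3, ih (a ++ [t]) (by simp; omega)]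
        have : List.replicate (3 - a.length) t = t :: List.replicate (3 - (a.length + 1)) t := by
          have : 3 - a.length = (3 - (a.length + 1)) + 1 := by omega
          rw [this, List.replicate_succ]
        simp [this]
      · rw [padWhile, if_neg h3]
        simp [Nat.sub_eq_zero_of_le (by omega : 3 ≤ a.length)]
  exact fun a => key _ a le_rfl

-- the nonempty case of A's t = answer[-1]
theorem pyGet_neg_one_getLast (l : List Char) (h : l ≠ []) :
    PySem.List.pyGet? l (-1) = some (l.getLastD 'a') := by
  rw [PySem.List.pyGet?_neg_one]
  cases hL : l.getLast? with
  | none => simp at hL; exact absurd hL h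
  | some x => simp [List.getLastD_eq_getLast?, hL]

theorem solution_eq_alt (new_id : String) : solution new_id = solution_alt new_id := by
  unfold solution solution_alt
  -- A's filter loop produces the filtered list
  have hfilter :
      (PySem.Chars.lower new_id.toList).foldl (fun acc i =>
        if PySem.Chars.isalpha i || PySem.Chars.isdigit i then acc ++ [i]
        else if i = '-' ∨ i = '_' ∨ i = '.' then acc ++ [i]
        else acc) [] =
      (PySem.Chars.lower new_id.toList).filter keepP := by
    have hstep : (fun (acc : List Char) (i : Char) =>
        if PySem.Chars.isalpha i || PySem.Chars.isdigit i then acc ++ [i]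
        else if i = '-' ∨ i = '_' ∨ i = '.' then acc ++ [i]
        else acc) =
        (fun (acc : List Char) (i : Char) =>
          if keepP i = true then acc ++ [id i] else acc) := by
      funext acc i
      by_cases h1 : PySem.Chars.isalpha i || PySem.Chars.isdigit i
      · simp [h1, keepP]
      · by_cases h2 : i = '-' ∨ i = '_' ∨ i = '.'
        · simp only [h1] at *
          rcases h2 with h | h | h <;> simp [h, keepP, h1]
        · push_neg at h2
          simp [h1, keepP, h2.1, h2.2.1, h2.2.2]
    rw [hstep, PySem.List.foldl_append_if, List.map_id]
    simp
  -- B's fused loop produces the strip of the collapse of that same filtered list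
  have hB : (PySem.Chars.lower new_id.toList).foldl (fun out c =>
      if c = '.' then (if out ≠ [] ∧ out.getLast? ≠ some '.' then out ++ ['.'] else out)
      else if PySem.Chars.isalpha c || PySem.Chars.isdigit c || c = '-' || c = '_' then out ++ [c]
      else out) [] = ldtail (go false ((PySem.Chars.lower new_id.toList).filter keepP)) := by
    exact bstep_foldl_nil (PySem.Chars.lower new_id.toList)
  simp only [hfilter, hB]
  set k := (PySem.Chars.lower new_id.toList).filter keepP with hk
  -- A's dedup is the flag-collapse
  have hdedup : removeDuplicates k = go false k := by
    unfold removeDuplicates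
    rw [removeDuplicates_foldl_eq, remDupGo_eq_go]
    simp
  rw [hdedup]
  set d := go false k with hd
  -- A's guarded leading strip is ldtail
  have hstrip1 : (if d ≠ [] then (if d.head? = some '.' then d.drop 1 else d) else d) = ldtail d := by
    cases d with
    | nil => simp [ldtail]
    | cons c t => by_cases h : c = '.' <;> simp [h, ldtail]
  rw [hstrip1]
  set e := ldtail d with he
  -- trailing strip forms agree
  have hstrip2 : (if e ≠ [] then (if e.getLast? = some '.' then e.dropLast else e) else e) =
      (if e ≠ [] ∧ e.getLast? = some '.' then e.dropLast else e) := by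
    cases hE : e with
    | nil => simp
    | cons c t => simp
  rw [hstrip2]
  set f := if e ≠ [] ∧ e.getLast? = some '.' then e.dropLast else e with hf
  have hempty : (if f.length = 0 then f ++ ['a'] else f) = (if f = [] then ['a'] else f) := by
    cases f <;> simp
  rw [hempty]
  set g := if f = [] then ['a'] else f with hg
  have hgne : g ≠ [] := by
    rw [hg]; cases hF : f <;> simp
  set h16 := if g.length ≥ 16 then
      (let a := g.take 15
       if a.getLast? = some '.' then a.dropLast else a)
    else g with hh
  have hne : h16 ≠ [] := by
    rw [hh]
    by_cases hlen : g.length ≥ 16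
    · simp only [if_pos hlen]
      have ht : (g.take 15).length = 15 := by simp; omega
      by_cases hl : (g.take 15).getLast? = some '.'
      · simp only [hl]
        intro habs
        have := congrArg List.length habs
        simp [ht] at this
      · simp only [hl]
        intro habs
        have := congrArg List.length habs
        simp [ht] at this
    · simpa [if_neg hlen] using hgne
  -- B's closed-form padding matches A's guarded while-loop
  have hslice : PySem.List.slice h16 (some (-1)) none = [h16.getLastD 'a'] := by
    rw [PySem.List.slice_from_neg_one]
    cases hH : h16 with
    | nil => exact absurd hH hne
    | cons c t =>
      rw [← hH]
      have h1 : 1 ≤ h16.length := List.length_pos_iff.mpr hne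
      have hdl : h16.drop (h16.length - 1) = [h16.getLast hne] := List.drop_length_sub_one hne
      rw [hdl]
      have hgl : h16.getLastD 'a' = h16.getLast hne := by
        rw [List.getLastD_eq_getLast?, List.getLast?_eq_getLast_of_ne_nil hne]
        rfl
      rw [hgl]
  have hflat : (List.replicate (3 - h16.length) [h16.getLastD 'a']).flatten =
      List.replicate (3 - h16.length) (h16.getLastD 'a') := by
    generalize 3 - h16.length = n
    induction n with
    | zero => simp
    | succ n ih => simp [List.replicate_succ, ih]
  by_cases hp : h16.length ≤ 2
  · rw [if_pos hp, pyGet_neg_one_getLast h16 hne]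
    show String.ofList (padWhile h16 (h16.getLastD 'a')) = _
    rw [padWhile_eq, hslice, hflat]
  · rw [if_neg hp, hslice, hflat]
    have : 3 - h16.length = 0 := by omega
    simp [this]

-- ===== VERDICT =====
theorem solution_spec : Claim_equal_solution := by
  intro new_id _
  unfold Spec_solution
  exact solution_eq_alt new_id
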